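-- pv_equiv track=rewrite | github.com/Jh123x/AdventOfCode | 2024/day9/test.py | gen_space_and_sector
-- ===== SOURCE A (Python) =====
-- from typing import List, Any, Dict, Tuple
--
-- def gen_space_and_sector(blocks: List[int]) -> Tuple[List[int], List[Tuple[int, int]], List[Tuple[int, int]]]:
--     space = []
--     free_list = []
--     sectors = []
--     is_free = False
--
--     for no in blocks:
--         if is_free:
--             free_list.append([len(space), no])
--             space.extend([None] * no)
--         else:
--             sectors.append((len(space), no))
--             space.extend([len(sectors) - 1] * no)
--         is_free = not is_free
--
--     return space, free_list, sectors
-- ===== SOURCE B (Python) =====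
-- def gen_space_and_sector(blocks):
--     # Precompute a prefix-sum offset table, then derive everything from the
--     # index parity: even indices are sectors (id i//2), odd indices are free.
--     offs = []
--     c = 0
--     for no in blocks:
--         offs.append(c)
--         c += no
--     entries = list(enumerate(zip(offs, blocks)))
--     space = []
--     for i, (off, no) in entries:
--         space += [None if i % 2 else i // 2] * no
--     free_list = [[off, no] for i, (off, no) in entries if i % 2]
--     sectors = [(off, no) for i, (off, no) in entries if i % 2 == 0]
--     return space, free_list, sectors
-- ===== Notes on version B (the rewrite author's own statement) =====
-- stated objective: alternative
-- what changed: Replaces A's toggled is_free flag and running len(space)/len(sectors) bookkeeping by a precomputed prefix-sum offset table plus index parity, building the three result lists by separate comprehensions instead of one stateful loop; Pre_ restricts to nonnegative block sizes (the natural domain of disk block counts), on which A's accidental offsets for negative sizes never arise.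
-- outside the precondition, e.g. on gen_space_and_sector([-1, 1]): A returns ([None], [[0, 1]], [(0, -1)]), B returns ([None], [[-1, 1]], [(0, -1)])
import Mathlib
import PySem

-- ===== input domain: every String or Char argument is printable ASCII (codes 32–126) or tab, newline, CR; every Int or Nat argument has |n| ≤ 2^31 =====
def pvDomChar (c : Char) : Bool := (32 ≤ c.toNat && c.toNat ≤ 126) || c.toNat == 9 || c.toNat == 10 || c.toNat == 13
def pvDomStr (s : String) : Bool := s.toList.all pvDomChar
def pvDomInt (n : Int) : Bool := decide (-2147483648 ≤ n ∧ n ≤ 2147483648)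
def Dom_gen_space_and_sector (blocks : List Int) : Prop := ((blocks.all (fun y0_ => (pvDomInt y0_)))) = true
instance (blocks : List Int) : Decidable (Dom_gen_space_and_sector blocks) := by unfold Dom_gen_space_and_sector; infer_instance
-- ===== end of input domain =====

-- B replaces A's toggled boolean and `len(space)`/`len(sectors)` bookkeeping by a prefix-sum
-- offset table plus index parity (objective: alternative decomposition, same cost).

-- ===== PORT A =====
-- loop body of A; state: (space, free_list, sectors, is_free);
-- `[x] * no` is replicate no.toNat (empty for no < 0, as in Python)
def stepA (st : List (Option Int) × List (List Int) × List (Int × Int) × Bool) (no : Int) :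
    List (Option Int) × List (List Int) × List (Int × Int) × Bool :=
  let space := st.1; let free_list := st.2.1; let sectors := st.2.2.1; let is_free := st.2.2.2
  if is_free then
    (space ++ List.replicate no.toNat none,
     free_list ++ [[(space.length : Int), no]], sectors, !is_free)
  else
    let sectors' := sectors ++ [((space.length : Int), no)]
    (space ++ List.replicate no.toNat (some ((sectors'.length : Int) - 1)),
     free_list, sectors', !is_free)

def gen_space_and_sector (blocks : List Int) :
    List (Option Int) × List (List Int) × (List (Int × Int)) :=
  let st := blocks.foldl stepA ([], [], [], false)
  (st.1, st.2.1, st.2.2.1)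

-- ===== PORT B =====
-- offs/c loop of B: state (offs, c)
def altOffs (blocks : List Int) : List Int :=
  (blocks.foldl (fun (p : List Int × Int) no => (p.1 ++ [p.2], p.2 + no)) ([], 0)).1

def altEntries (blocks : List Int) : List (Int × (Int × Int)) :=
  PySem.List.enumerate ((altOffs blocks).zip blocks) 0

def gen_space_and_sector_alt (blocks : List Int) :
    List (Option Int) × List (List Int) × (List (Int × Int)) :=
  -- `i % 2` is truthy iff i % 2 == 1 (i ≥ 0 here); `i // 2` is floor division;
  -- space loop does `space += [x] * no` per entry
  ((altEntries blocks).foldl (fun acc e =>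
      acc ++ List.replicate e.2.2.toNat
        (if e.1 % 2 == 1 then none else some (PySem.Int.floordiv e.1 2))) [],
   ((altEntries blocks).filter (fun e => e.1 % 2 == 1)).map (fun e => [e.2.1, e.2.2]),
   ((altEntries blocks).filter (fun e => e.1 % 2 == 0)).map (fun e => (e.2.1, e.2.2)))

-- ===== PRECONDITION & SPEC =====
-- Pre_ restricts to nonnegative block sizes — the natural domain (counts of disk blocks);
-- for negative sizes A's offsets are an accident of `extend` with a negative count being a no-op.
def Pre_gen_space_and_sector (blocks : List Int) : Prop := ∀ b ∈ blocks, 0 ≤ b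
instance (blocks : List Int) : Decidable (Pre_gen_space_and_sector blocks) := by unfold Pre_gen_space_and_sector; infer_instance
def pvWitness_gen_space_and_sector : List Int := [1, 2, 3]
def Spec_gen_space_and_sector (blocks : List Int) (out : List (Option Int) × List (List Int) × (List (Int × Int))) : Prop := out = gen_space_and_sector_alt blocks
instance (blocks : List Int) (out : List (Option Int) × List (List Int) × (List (Int × Int))) : Decidable (Spec_gen_space_and_sector blocks out) := by unfold Spec_gen_space_and_sector; infer_instance

-- ===== CLAIM (what is proved, stated in full; the proofs are below) =====
def Claim_equal_gen_space_and_sector : Prop := ∀ (blocks : List Int), Dom_gen_space_and_sector blocks → Pre_gen_space_and_sector blocks → Spec_gen_space_and_sector blocks (gen_space_and_sector blocks)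

-- ===== LEMMAS AND PROOFS =====

def pvOffs : Int → List Int → List Int
  | _, [] => []
  | c, no :: rest => c :: pvOffs (c + no) rest

theorem offs_foldl (blocks : List Int) : ∀ (o : List Int) (c : Int),
    (blocks.foldl (fun (p : List Int × Int) no => (p.1 ++ [p.2], p.2 + no)) (o, c)).1
      = o ++ pvOffs c blocks := by
  induction blocks with
  | nil => intro o c; simp [pvOffs]
  | cons no rest ih => intro o c; simp [List.foldl_cons, ih, pvOffs]

def specB (s c : Int) : List Int → List (Option Int) × List (List Int) × List (Int × Int)
  | [] => ([], [], [])
  | no :: rest =>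
    let r := specB (s + 1) (c + no) rest
    if s % 2 == 1 then
      (List.replicate no.toNat none ++ r.1, [c, no] :: r.2.1, r.2.2)
    else
      (List.replicate no.toNat (some (PySem.Int.floordiv s 2)) ++ r.1,
       r.2.1, (c, no) :: r.2.2)

theorem alt_gen (blocks : List Int) : ∀ (s c : Int),
    ((PySem.List.enumerate ((pvOffs c blocks).zip blocks) s).flatMap (fun e =>
        List.replicate e.2.2.toNat
          (if e.1 % 2 == 1 then none else some (PySem.Int.floordiv e.1 2)))
      = (specB s c blocks).1)
    ∧ (((PySem.List.enumerate ((pvOffs c blocks).zip blocks) s).filter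
          (fun e => e.1 % 2 == 1)).map (fun e => [e.2.1, e.2.2]) = (specB s c blocks).2.1)
    ∧ (((PySem.List.enumerate ((pvOffs c blocks).zip blocks) s).filter
          (fun e => e.1 % 2 == 0)).map (fun e => (e.2.1, e.2.2)) = (specB s c blocks).2.2) := by
  induction blocks with
  | nil => intro s c; simp [pvOffs, specB]
  | cons no rest ih =>
    intro s c
    obtain ⟨h1, h2, h3⟩ := ih (s + 1) (c + no)
    by_cases hp : s % 2 = 1
    · simp [pvOffs, specB, PySem.List.enumerate_cons, hp] at h1 h2 h3 ⊢
      exact ⟨h1, h2, h3⟩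
    · have hs2 : s % 2 = 0 := by omega
      simp [pvOffs, specB, PySem.List.enumerate_cons, hs2] at h1 h2 h3 ⊢
      exact ⟨h1, h2, h3⟩

theorem A_gen (blocks : List Int) (hnn : ∀ b ∈ blocks, 0 ≤ b) :
    ∀ (sp : List (Option Int)) (fr : List (List Int)) (se : List (Int × Int)) (s : Int),
    0 ≤ s → ((se.length : Int) = (s + 1) / 2) →
    (blocks.foldl stepA (sp, fr, se, decide (s % 2 = 1)))
    = (sp ++ (specB s (sp.length) blocks).1,
       fr ++ (specB s (sp.length) blocks).2.1,
       se ++ (specB s (sp.length) blocks).2.2,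
       decide ((s + blocks.length) % 2 = 1)) := by
  induction blocks with
  | nil => intro sp fr se s hs hse; simp [specB]
  | cons no rest ih =>
    have hno : 0 ≤ no := hnn no (by simp)
    have hrest : ∀ b ∈ rest, 0 ≤ b := fun b hb => hnn b (by simp [hb])
    intro sp fr se s hs hse
    rw [List.foldl_cons]
    by_cases hp : s % 2 = 1
    · have hst : stepA (sp, fr, se, decide (s % 2 = 1)) no
          = (sp ++ List.replicate no.toNat none, fr ++ [[(sp.length : Int), no]], se,
             decide ((s + 1) % 2 = 1)) := by
        have h1 : decide (s % 2 = 1) = true := by simp [hp]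
        have h2 : decide ((s + 1) % 2 = 1) = false := by
          have he : (s + 1) % 2 = 0 := by omega
          simp [he]
        simp [stepA, h1, h2]
      rw [hst, ih hrest _ _ _ (s + 1) (by omega) (by omega)]
      have hc : (((sp ++ List.replicate no.toNat none).length : Int))
          = (sp.length : Int) + no := by simp; omega
      rw [hc]
      simp [specB, hp]
      omega
    · have hst : stepA (sp, fr, se, decide (s % 2 = 1)) no
          = (sp ++ List.replicate no.toNat (some (((se ++ [((sp.length : Int), no)]).length : Int) - 1)),
             fr, se ++ [((sp.length : Int), no)], decide ((s + 1) % 2 = 1)) := by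
        have h1 : decide (s % 2 = 1) = false := by simp [hp]
        have h2 : decide ((s + 1) % 2 = 1) = true := by
          have he : (s + 1) % 2 = 1 := by omega
          simp [he]
        simp [stepA, h1, h2]
      rw [hst, ih hrest _ _ _ (s + 1) (by omega) (by simp; omega)]
      have hc : (((sp ++ List.replicate no.toNat
            (some (((se ++ [((sp.length : Int), no)]).length : Int) - 1))).length : Int))
          = (sp.length : Int) + no := by simp; omega
      rw [hc]
      have hid : ((se ++ [((sp.length : Int), no)]).length : Int) - 1 = PySem.Int.floordiv s 2 := by
        rw [PySem.Int.floordiv_eq_ediv_of_pos (by omega)]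
        simp; omega
      rw [hid]
      have hs2 : s % 2 = 0 := by omega
      simp [specB, hs2]
      omega

-- ===== VERDICT (by name: the statement is the Claim_ definition above) =====
theorem gen_space_and_sector_spec : Claim_equal_gen_space_and_sector := by
  intro blocks _ hpre
  unfold Spec_gen_space_and_sector gen_space_and_sector gen_space_and_sector_alt
  obtain ⟨h1, h2, h3⟩ := alt_gen blocks 0 0
  have hA := A_gen blocks hpre [] [] [] 0 (by omega) (by simp)
  have hO := offs_foldl blocks [] 0
  simp only [List.nil_append] at hA hO
  norm_num at hA
  have hE : altEntries blocks = PySem.List.enumerate ((pvOffs 0 blocks).zip blocks) 0 := by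
    unfold altEntries altOffs
    rw [hO]
  rw [hE, PySem.List.foldl_append_eq_flatMap, List.nil_append, h1, h2, h3, hA]
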